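-- pv_equiv track=rewrite | github.com/riyazahamad03/Data_Structures_and_algorithm | Arrays/leetcode2028.py | missingRolls
-- ===== SOURCE A (Python) =====
-- def missingRolls(rolls: list[int], mean: int, n: int) -> list[int]:
--     m = len(rolls)
--     total_sum = mean * (m + n)
--     missing_sum = total_sum - sum(rolls)
--
--     if missing_sum > 6 * n or missing_sum < n:
--         return []
--     res = []
--
--     while n:
--         dice = min(6, missing_sum - n + 1)
--         res.append(dice)
--         missing_sum -= dice
--         n -= 1
--     return res
-- ===== SOURCE B (Python) =====
-- def _closed_form(missing_sum: int, n: int) -> list[int]: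
--     extra = missing_sum - n
--     k, rem = divmod(extra, 5)
--     if k == n:
--         return [6] * k
--     return [6] * k + [1 + rem] + [1] * (n - k - 1)
--
--
-- def missingRolls(rolls: list[int], mean: int, n: int) -> list[int]:
--     missing_sum = mean * (len(rolls) + n) - sum(rolls)
--     if missing_sum > 6 * n or missing_sum < n:
--         return []
--     return _closed_form(missing_sum, n)
-- ===== Notes on version B (the rewrite author's own statement) =====
-- stated objective: simpler
-- what changed: Replaces the per-die greedy while-loop with a closed-form divmod construction: k = (missing_sum-n)//5 dice are 6, one die is 1+remainder, the rest are 1, built with list repetition.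
import Mathlib
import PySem

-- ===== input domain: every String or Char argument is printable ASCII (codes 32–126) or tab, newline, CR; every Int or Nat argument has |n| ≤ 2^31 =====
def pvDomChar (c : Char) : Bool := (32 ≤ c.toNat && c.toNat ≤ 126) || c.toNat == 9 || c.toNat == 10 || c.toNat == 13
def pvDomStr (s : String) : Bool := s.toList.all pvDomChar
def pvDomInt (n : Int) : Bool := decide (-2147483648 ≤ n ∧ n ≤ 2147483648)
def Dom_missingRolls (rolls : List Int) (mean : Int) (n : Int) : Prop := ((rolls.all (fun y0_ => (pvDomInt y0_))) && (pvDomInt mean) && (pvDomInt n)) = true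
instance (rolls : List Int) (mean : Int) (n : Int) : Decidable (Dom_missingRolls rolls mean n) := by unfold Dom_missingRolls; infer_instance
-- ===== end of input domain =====

-- B replaces the per-die greedy while-loop with a closed-form divmod construction (same values, same order).

-- ===== PORT A =====
-- the 'while n:' loop; the validity guard guarantees n ≥ 0 at the call, so
-- terminating recursion on n.toNat is exact on every reachable state
def missingRollsLoop (missing_sum : Int) (n : Int) : List Int :=
  if h : 0 < n then
    let dice := min 6 (missing_sum - n + 1)
    dice :: missingRollsLoop (missing_sum - dice) (n - 1)
  else []
termination_by n.toNat
decreasing_by omega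

def missingRolls (rolls : List Int) (mean : Int) (n : Int) : List Int :=
  let m : Int := rolls.length
  let total_sum := mean * (m + n)
  let missing_sum := total_sum - rolls.sum
  if missing_sum > 6 * n ∨ missing_sum < n then []
  else missingRollsLoop missing_sum n

-- ===== PORT B =====
def closedForm (missing_sum : Int) (n : Int) : List Int :=
  let extra := missing_sum - n
  let k := PySem.Int.floordiv extra 5
  let rem := PySem.Int.mod extra 5
  if k = n then List.replicate k.toNat 6
  else List.replicate k.toNat 6 ++ (1 + rem) :: List.replicate (n - k - 1).toNat 1

def missingRolls_alt (rolls : List Int) (mean : Int) (n : Int) : List Int :=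
  let missing_sum := mean * (rolls.length + n) - rolls.sum
  if missing_sum > 6 * n ∨ missing_sum < n then []
  else closedForm missing_sum n

-- ===== PRECONDITION & SPEC =====
def Spec_missingRolls (rolls : List Int) (mean : Int) (n : Int) (out : List Int) : Prop := out = missingRolls_alt rolls mean n
instance (rolls : List Int) (mean : Int) (n : Int) (out : List Int) : Decidable (Spec_missingRolls rolls mean n out) := by unfold Spec_missingRolls; infer_instance

-- ===== CLAIM (what is proved, stated in full; the proofs are below) =====
def Claim_equal_missingRolls : Prop := ∀ (rolls : List Int) (mean : Int) (n : Int), Dom_missingRolls rolls mean n → Spec_missingRolls rolls mean n (missingRolls rolls mean n)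

-- ===== LEMMAS AND PROOFS =====

theorem loop_eq_closedForm : ∀ (N : Nat) (ms : Int), (N : Int) ≤ ms → ms ≤ 6 * N →
    missingRollsLoop ms N = closedForm ms N := by
  intro N
  induction N with
  | zero =>
    intro ms h1 h2
    have : ms = 0 := by omega
    subst this
    simp [missingRollsLoop, closedForm, PySem.Int.floordiv]
  | succ N ih =>
    intro ms h1 h2
    have hpos : (0 : Int) < (N + 1 : Nat) := by push_cast; omega
    rw [missingRollsLoop, dif_pos hpos]
    have hfd : PySem.Int.floordiv (ms - (N + 1 : Nat)) 5 = (ms - (N + 1 : Nat)) / 5 :=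
      PySem.Int.floordiv_eq_ediv_of_pos (by omega)
    have hmd : PySem.Int.mod (ms - (N + 1 : Nat)) 5 = (ms - (N + 1 : Nat)) % 5 :=
      PySem.Int.mod_eq_emod_of_pos (by omega)
    by_cases h5 : 5 ≤ ms - (N + 1 : Nat)
    · -- dice = 6
      have hdice : min (6 : Int) (ms - (N + 1 : Nat) + 1) = 6 := by
        push_cast at h5 ⊢; omega
      push_cast at hdice ⊢
      rw [hdice]
      have en : ((N:Int) + 1 - 1) = (N:Int) := by ring
      rw [en, ih (ms - 6) (by push_cast at h1 ⊢; omega) (by push_cast at h2 ⊢; omega)]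
      -- compare closed forms
      unfold closedForm
      have hfd' : PySem.Int.floordiv (ms - 6 - (N : Int)) 5 = (ms - 6 - N) / 5 :=
        PySem.Int.floordiv_eq_ediv_of_pos (by omega)
      have hmd' : PySem.Int.mod (ms - 6 - (N : Int)) 5 = (ms - 6 - N) % 5 :=
        PySem.Int.mod_eq_emod_of_pos (by omega)
      push_cast at hfd hmd
      simp only [hfd, hmd, hfd', hmd']
      have e1 : ms - 6 - (N : Int) = (ms - ((N : Int) + 1)) - 5 := by ring
      have hk : (ms - ((N : Int) + 1)) / 5 = (ms - 6 - N) / 5 + 1 := by rw [e1]; omega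
      have hr : (ms - ((N : Int) + 1)) % 5 = (ms - 6 - N) % 5 := by rw [e1]; omega
      rw [hk, hr]
      set k' : Int := (ms - 6 - (N : Int)) / 5 with hk'
      have hk'nn : 0 ≤ k' := by
        have : 0 ≤ ms - 6 - (N : Int) := by push_cast at h5; omega
        positivity
      have htn : (k' + 1).toNat = k'.toNat + 1 := by omega
      by_cases hke : k' + 1 = (N : Int) + 1
      · have hke' : k' = (N : Int) := by omega
        rw [if_pos hke, if_pos hke', htn, List.replicate_succ]
      · have hke' : ¬ k' = (N : Int) := by omega
        rw [if_neg hke, if_neg hke', htn, List.replicate_succ]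
        have : (↑N + 1 - (k' + 1) - 1 : Int) = (↑N - k' - 1 : Int) := by ring
        simp only [this]
        simp
    · -- dice = extra + 1 ≤ 5 ; k = 0
      have h0 : 0 ≤ ms - (N + 1 : Nat) := by push_cast at h1 ⊢; omega
      have hdice : min (6 : Int) (ms - (N + 1 : Nat) + 1) = ms - (N + 1 : Nat) + 1 := by
        push_cast at h5 h0 ⊢; omega
      push_cast at hdice ⊢
      rw [hdice]
      have e2 : ms - (ms - ((N : Int) + 1) + 1) = (N : Int) := by ring
      have en : ((N:Int) + 1 - 1) = (N:Int) := by ring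
      rw [en, e2, ih (N : Int) (by omega) (by omega)]
      unfold closedForm
      have hfd0 : PySem.Int.floordiv ((N : Int) - N) 5 = 0 := by
        rw [PySem.Int.floordiv_eq_ediv_of_pos (by omega)]; simp
      have hmd0 : PySem.Int.mod ((N : Int) - N) 5 = 0 := by
        rw [PySem.Int.mod_eq_emod_of_pos (by omega)]; simp
      push_cast at hfd hmd
      simp only [hfd, hmd, hfd0, hmd0]
      have hkk : (ms - ((N : Int) + 1)) / 5 = 0 := by
        push_cast at h5 h0; omega
      have hrr : (ms - ((N : Int) + 1)) % 5 = ms - ((N : Int) + 1) := by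
        push_cast at h5 h0; omega
      rw [hkk, hrr]
      by_cases hN0 : (0 : Int) = (N : Int)
      · rw [if_pos hN0, if_neg (by omega)]
        have : ((N : Int) + 1 - 0 - 1).toNat = N := by omega
        simp [← hN0]
      · rw [if_neg hN0, if_neg (by omega)]
        have hN1 : 1 ≤ N := by omega
        have e3 : ((N : Int) - 0 - 1).toNat = N - 1 := by omega
        have e4 : ((N : Int) + 1 - 0 - 1).toNat = N := by omega
        simp only [e3, e4, Int.toNat_zero, List.replicate_zero, List.nil_append]
        have : N = (N - 1) + 1 := by omega
        rw [this, List.replicate_succ]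
        simp
        omega

-- ===== VERDICT (by name: the statement is the Claim_ definition above) =====
theorem missingRolls_spec : Claim_equal_missingRolls := by
  intro rolls mean n _
  unfold Spec_missingRolls missingRolls missingRolls_alt
  simp only []
  set ms := mean * ((rolls.length : Int) + n) - rolls.sum with hms
  by_cases hg : ms > 6 * n ∨ ms < n
  · rw [if_pos hg, if_pos hg]
  · rw [if_neg hg, if_neg hg]
    push Not at hg
    have hn : 0 ≤ n := by omega
    obtain ⟨N, rfl⟩ := Int.eq_ofNat_of_zero_le hn
    exact loop_eq_closedForm N ms hg.2 hg.1
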